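-- pv_equiv track=rewrite | github.com/hugo-mateus/MC102 | lab 12/lab12-23.py | pegar_valor
-- ===== SOURCE A (Python) =====
-- def pegar_valor(lista):
--     lista_separada = []
--     for item in lista:
--         for x in item:
--             if x == "1":
--                 lista_separada.append("10")
--             elif x != "0":
--                 lista_separada.append(x)
--
--     lista_primeiros = []
--     for r in range(len(lista_separada)):
--         if r % 2 == 0:
--             lista_primeiros.append(lista_separada[r])
--     return lista_primeiros
-- ===== SOURCE B (Python) =====
-- def pegar_valor(lista):
--     # One fused pass: emit each token directly, keeping only every other
--     # emitted token via a parity toggle (no intermediate full list).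
--     res = []
--     keep = True
--     for item in lista:
--         for x in item:
--             if x == "1":
--                 tok = "10"
--             elif x != "0":
--                 tok = x
--             else:
--                 continue
--             if keep:
--                 res.append(tok)
--             keep = not keep
--     return res
-- ===== Notes on version B (the rewrite author's own statement) =====
-- stated objective: simpler
-- what changed: Replaced the two-phase algorithm (build the full token list, then a second index loop picking even positions) by a single fused pass that emits tokens directly and keeps every other one via a parity toggle, with no intermediate list and no indexing.
import Mathlib
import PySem

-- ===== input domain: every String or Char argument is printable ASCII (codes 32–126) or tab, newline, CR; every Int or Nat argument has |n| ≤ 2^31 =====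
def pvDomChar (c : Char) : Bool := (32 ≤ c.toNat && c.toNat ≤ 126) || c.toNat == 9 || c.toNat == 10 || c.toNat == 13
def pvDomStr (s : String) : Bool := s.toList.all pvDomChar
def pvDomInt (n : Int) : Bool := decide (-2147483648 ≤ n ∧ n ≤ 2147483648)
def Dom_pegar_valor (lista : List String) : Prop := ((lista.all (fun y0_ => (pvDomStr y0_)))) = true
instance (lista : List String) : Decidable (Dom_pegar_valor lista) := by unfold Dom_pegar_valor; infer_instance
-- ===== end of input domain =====

-- B fuses A's two passes (build token list, then keep even indices) into one
-- pass with a parity toggle; same output, no intermediate list (objective: simpler).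

-- ===== PORT A =====
-- inner char step of A's first loop: append "10" for '1', the char itself unless '0'
def pvTokStep (acc : List String) (x : Char) : List String :=
  if x = '1' then acc ++ ["10"]
  else if x ≠ '0' then acc ++ [String.singleton x] else acc

def pegar_valor (lista : List String) : List String :=
  let lista_separada :=
    lista.foldl (fun acc item => item.toList.foldl pvTokStep acc) []
  -- second loop: indices are always in range, so pyGetD's default is never used
  (PySem.List.pyRange 0 (lista_separada.length : Int) 1).foldl
    (fun acc r => if PySem.Int.mod r 2 = 0
                  then acc ++ [PySem.List.pyGetD lista_separada r ""] else acc) []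

-- ===== PORT B =====
-- fused step: state = (keep parity, output so far)
def pvBStep (st : Bool × List String) (x : Char) : Bool × List String :=
  if x = '1' then (!st.1, if st.1 then st.2 ++ ["10"] else st.2)
  else if x ≠ '0' then (!st.1, if st.1 then st.2 ++ [String.singleton x] else st.2)
  else st

def pegar_valor_alt (lista : List String) : List String :=
  (lista.foldl (fun st item => item.toList.foldl pvBStep st) (true, [])).2

-- ===== PRECONDITION & SPEC =====
def Spec_pegar_valor (lista : List String) (out : List String) : Prop := out = pegar_valor_alt lista
instance (lista : List String) (out : List String) : Decidable (Spec_pegar_valor lista out) := by unfold Spec_pegar_valor; infer_instance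

-- ===== CLAIM (what is proved, stated in full; the proofs are below) =====
def Claim_equal_pegar_valor : Prop := ∀ (lista : List String), Dom_pegar_valor lista → Spec_pegar_valor lista (pegar_valor lista)

-- ===== LEMMAS AND PROOFS =====

-- even-indexed elements of a list
def pvEvens : List String → List String
  | [] => []
  | [a] => [a]
  | a :: _ :: l => a :: pvEvens l

theorem pvEvens_append_singleton (l : List String) (a : String) :
    pvEvens (l ++ [a]) = if l.length % 2 = 0 then pvEvens l ++ [a] else pvEvens l := by
  induction l using pvEvens.induct with
  | case1 => simp [pvEvens]
  | case2 b => simp [pvEvens]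
  | case3 b c l ih =>
      simp only [List.cons_append, pvEvens, List.length_cons, ih]
      split_ifs with h1 h2 h2 <;> simp_all <;> omega

-- A's second loop computes pvEvens
theorem pvRangeLoop_eq_evens (s : List String) :
    (PySem.List.pyRange 0 (s.length : Int) 1).foldl
      (fun acc r => if PySem.Int.mod r 2 = 0
                    then acc ++ [PySem.List.pyGetD s r ""] else acc) [] = pvEvens s := by
  suffices h : ∀ n : Nat, n ≤ s.length →
      (PySem.List.pyRange 0 (n : Int) 1).foldl
        (fun acc r => if PySem.Int.mod r 2 = 0
                      then acc ++ [PySem.List.pyGetD s r ""] else acc) [] = pvEvens (s.take n) by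
    simpa using h s.length le_rfl
  intro n hn
  induction n with
  | zero => simp [PySem.List.pyRange_one_eq_nil, pvEvens]
  | succ n ih =>
      rw [show ((n + 1 : Nat) : Int) = (n : Int) + 1 by push_cast; ring,
        PySem.List.pyRange_one_succ_right (by positivity), List.foldl_append,
        ih (by omega)]
      have htake : s.take (n + 1) = s.take n ++ [s[n]'(by omega)] :=
        List.take_succ_eq_append_getElem (by omega)
      have hmod : PySem.Int.mod (n : Int) 2 = ((n % 2 : Nat) : Int) := by
        rw [PySem.Int.mod_eq_emod_of_pos (by norm_num)]; omega
      have hget : PySem.List.pyGetD s (n : Int) "" = s[n]'(by omega) := by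
        rw [PySem.List.pyGetD_natCast]
        simp [List.getD, List.getElem?_eq_getElem (by omega : n < s.length)]
      simp only [List.foldl_cons, List.foldl_nil]
      rw [hmod, hget, htake, pvEvens_append_singleton]
      simp only [List.length_take]
      rcases Nat.even_or_odd n with he | ho
      · have : n % 2 = 0 := Nat.even_iff.mp he
        simp [this, Nat.min_eq_left (by omega : n ≤ s.length)]
      · have : n % 2 = 1 := Nat.odd_iff.mp ho
        simp [this, Nat.min_eq_left (by omega : n ≤ s.length)]

-- B's fused state tracks (parity of tokens emitted so far, pvEvens of them)
theorem pvBStep_invariant_chars (cs : List Char) (s : List String) :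
    cs.foldl pvBStep (decide (s.length % 2 = 0), pvEvens s)
      = (decide ((cs.foldl pvTokStep s).length % 2 = 0), pvEvens (cs.foldl pvTokStep s)) := by
  induction cs generalizing s with
  | nil => rfl
  | cons x cs ih =>
      simp only [List.foldl_cons]
      have step : pvBStep (decide (s.length % 2 = 0), pvEvens s) x
          = (decide ((pvTokStep s x).length % 2 = 0), pvEvens (pvTokStep s x)) := by
        unfold pvBStep pvTokStep
        by_cases hp : s.length % 2 = 0 <;>
          split_ifs with h1 h2 <;>
          simp_all [pvEvens_append_singleton, Nat.succ_mod_two_eq_zero_iff]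
      rw [step, ih]
      rfl


theorem pvBStep_invariant (lista : List String) (s : List String) :
    lista.foldl (fun st item => item.toList.foldl pvBStep st) (decide (s.length % 2 = 0), pvEvens s)
      = (decide ((lista.foldl (fun acc item => item.toList.foldl pvTokStep acc) s).length % 2 = 0),
         pvEvens (lista.foldl (fun acc item => item.toList.foldl pvTokStep acc) s)) := by
  induction lista generalizing s with
  | nil => rfl
  | cons it rest ih =>
      simp only [List.foldl_cons]
      rw [pvBStep_invariant_chars, ih]
      rfl



-- ===== VERDICT (by name: the statement is the Claim_ definition above) =====
theorem pegar_valor_spec : Claim_equal_pegar_valor := by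
  intro lista _
  unfold Spec_pegar_valor pegar_valor pegar_valor_alt
  have h0 : (true, ([] : List String)) = (decide (([] : List String).length % 2 = 0), pvEvens []) := by
    simp [pvEvens]
  rw [h0, pvBStep_invariant, pvRangeLoop_eq_evens]
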